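-- pv_equiv track=rewrite | github.com/igamenovoer/PeiDocker | src/pei_docker/user_config/utils.py | port_mapping_dict_to_str
-- ===== SOURCE A (Python) =====
-- from typing import Dict, List, Optional
--
-- def port_mapping_dict_to_str(port_mapping: Dict[int, int]) -> List[str]:
--     """
--     Convert port mapping dictionary to string format.
--
--     Transforms a dictionary of host-to-container port mappings into Docker-style
--     port mapping strings. Automatically detects and optimizes consecutive port
--     ranges into range notation for cleaner configuration.
--
--     Parameters
--     ----------
--     port_mapping : Dict[int, int]
--         Dictionary mapping host port numbers to container port numbers.
--
--     Returns
--     -------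
--     List[str]
--         List of port mapping strings in formats:
--         - Single: "8080:80" for individual port mappings
--         - Range: "8000-8010:9000-9010" for consecutive port sequences
--
--     Examples
--     --------
--     Individual port mappings:
--         >>> port_mapping_dict_to_str({8080: 80, 3000: 3000})
--         ['8080:80', '3000:3000']
--
--     Consecutive ports optimized to range:
--         >>> port_mapping_dict_to_str({8000: 9000, 8001: 9001, 8002: 9002})
--         ['8000-8002:9000-9002']
--
--     Mixed individual and range mappings:
--         >>> port_mapping_dict_to_str({8080: 80, 9000: 9000, 9001: 9001})
--         ['8080:80', '9000-9001:9000-9001']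
--
--     Notes
--     -----
--     The function automatically detects consecutive port sequences and converts
--     them to range notation for more compact representation. Port mappings are
--     sorted by host port number for consistent output.
--     """
--
--     output: List[str] = []
--
--     if len(port_mapping) == 0:
--         return output
--
--     port_from_range_start: int = -1
--     port_to_range_start: int = -1
--     port_from_prev: int = -1
--     port_to_prev: int = -1
--
--     for port_from, port_to in sorted(port_mapping.items()):
--         # first port, initialize the range
--         if port_from_prev == -1:
--             port_from_range_start = port_from
--             port_to_range_start = port_to
--         elif port_from_prev == port_from - 1 and port_to_prev == port_to - 1:
--             # we are in a range, no need to do anything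
--             pass
--         else:
--             # the previous range has ended, add it to the output
--             if port_from_range_start == port_from_prev:  # single port
--                 port_mapping_entry = f'{port_from_range_start}:{port_to_range_start}'
--                 output.append(port_mapping_entry)
--             else:
--                 port_mapping_entry = f'{port_from_range_start}-{port_from_prev}:{port_to_range_start}-{port_to_prev}'
--                 output.append(port_mapping_entry)
--
--             # start a new range
--             port_from_range_start = port_from
--             port_to_range_start = port_to
--
--         # update prev
--         port_from_prev = port_from
--         port_to_prev = port_to
--
--     # output the last range
--     if port_from_range_start == port_from_prev:  # single port
--         port_mapping_entry = f'{port_from_range_start}:{port_to_range_start}'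
--         output.append(port_mapping_entry)
--     else:
--         port_mapping_entry = f'{port_from_range_start}-{port_from_prev}:{port_to_range_start}-{port_to_prev}'
--         output.append(port_mapping_entry)
--
--     return output
-- ===== SOURCE B (Python) =====
-- from typing import Dict, List
--
--
-- def port_mapping_dict_to_str(port_mapping: Dict[int, int]) -> List[str]:
--     # Group the sorted items into runs of pairwise-consecutive mappings,
--     # then render each run: singletons as "f:t", longer runs as "f0-f1:t0-t1".
--     runs: List[List[tuple]] = []
--     for port_from, port_to in sorted(port_mapping.items()):
--         if runs and runs[-1][-1] == (port_from - 1, port_to - 1):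
--             runs[-1].append((port_from, port_to))
--         else:
--             runs.append([(port_from, port_to)])
--     output: List[str] = []
--     for run in runs:
--         f0, t0 = run[0]
--         f1, t1 = run[-1]
--         if len(run) == 1:
--             output.append(f'{f0}:{t0}')
--         else:
--             output.append(f'{f0}-{f1}:{t0}-{t1}')
--     return output
-- ===== Notes on version B (the rewrite author's own statement) =====
-- stated objective: simpler
-- what changed: B replaces A's single-pass emit-on-break state machine with -1 sentinel variables by a group-then-map decomposition: it first groups the sorted items into runs of consecutive pairs, then renders each run from its first and last element.
-- intended difference: On dicts that contain key -1 together with a larger key, A's -1 sentinel mistakes the iteration after key -1 for the first one and silently drops the mapping/range ending at key -1 from the output; B keeps every mapping, which is the intended conversion. — e.g. on port_mapping_dict_to_str([(-1, 5), (3, 4)]): A returns ["3:4"], B returns ["-1:5", "3:4"]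
import Mathlib
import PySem

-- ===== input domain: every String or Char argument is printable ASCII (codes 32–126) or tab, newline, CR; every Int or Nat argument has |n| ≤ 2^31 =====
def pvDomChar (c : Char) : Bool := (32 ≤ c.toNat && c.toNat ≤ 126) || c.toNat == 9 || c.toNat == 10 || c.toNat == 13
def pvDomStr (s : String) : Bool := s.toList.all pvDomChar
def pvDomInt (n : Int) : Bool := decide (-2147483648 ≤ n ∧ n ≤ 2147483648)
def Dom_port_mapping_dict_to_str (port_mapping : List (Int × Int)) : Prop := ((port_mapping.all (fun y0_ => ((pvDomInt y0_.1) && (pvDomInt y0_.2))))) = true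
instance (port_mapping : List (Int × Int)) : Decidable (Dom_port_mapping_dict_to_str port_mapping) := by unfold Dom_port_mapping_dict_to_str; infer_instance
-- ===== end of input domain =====

-- B replaces A's emit-on-break state machine (with -1 sentinel variables) by
-- grouping the sorted items into runs and mapping each run to its string (objective: simpler).


-- ===== PORT A =====
-- the two f-string shapes A emits (shared by both branches of A's code)
def pvEmit (rs ts pf pt : Int) : String :=
  if rs = pf then PySem.Int.toStr rs ++ ":" ++ PySem.Int.toStr ts
  else PySem.Int.toStr rs ++ "-" ++ PySem.Int.toStr pf ++ ":" ++
       PySem.Int.toStr ts ++ "-" ++ PySem.Int.toStr pt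

-- the loop body of A: state (output, range_start_from, range_start_to, prev_from, prev_to)
def pvStepA (st : List String × Int × Int × Int × Int) (p : Int × Int) :
    List String × Int × Int × Int × Int :=
  match st with
  | (out, rs, ts, pf, pt) =>
    if pf = -1 then (out, p.1, p.2, p.1, p.2)
    else if pf = p.1 - 1 ∧ pt = p.2 - 1 then (out, rs, ts, p.1, p.2)
    else (out ++ [pvEmit rs ts pf pt], p.1, p.2, p.1, p.2)

-- the trailing "output the last range" code of A
def pvFinish (st : List String × Int × Int × Int × Int) : List String :=
  match st with
  | (out, rs, ts, pf, pt) => out ++ [pvEmit rs ts pf pt]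

def port_mapping_dict_to_str (port_mapping : List (Int × Int)) : List String :=
  if port_mapping.length = 0 then []
  else
    pvFinish ((PySem.List.sorted2 port_mapping Prod.fst Prod.snd).foldl pvStepA
      ([], -1, -1, -1, -1))

-- ===== PORT B =====
-- Source B's grouping loop body: extend the last run if consecutive, else open a new run
def pvStepB (runs : List (List (Int × Int))) (p : Int × Int) : List (List (Int × Int)) :=
  match runs.getLast? with
  | some run =>
      if run.getLast? = some (p.1 - 1, p.2 - 1) then runs.dropLast ++ [run ++ [p]]
      else runs ++ [[p]]
  | none => runs ++ [[p]]

-- Source B's rendering of one run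
def pvRunStr (run : List (Int × Int)) : String :=
  let f := run.headD (0, 0)
  let l := run.getLastD (0, 0)
  if run.length = 1 then PySem.Int.toStr f.1 ++ ":" ++ PySem.Int.toStr f.2
  else PySem.Int.toStr f.1 ++ "-" ++ PySem.Int.toStr l.1 ++ ":" ++
       PySem.Int.toStr f.2 ++ "-" ++ PySem.Int.toStr l.2

def port_mapping_dict_to_str_alt (port_mapping : List (Int × Int)) : List String :=
  (((PySem.List.sorted2 port_mapping Prod.fst Prod.snd).foldl pvStepB []).map pvRunStr)

-- ===== PRECONDITION & SPEC =====
-- Pre_ excludes association lists with duplicate keys, which cannot arise from a Python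
-- dict (the dict collapses them before A ever runs).
def Pre_port_mapping_dict_to_str (port_mapping : List (Int × Int)) : Prop :=
  (port_mapping.map Prod.fst).Nodup
instance (port_mapping : List (Int × Int)) : Decidable (Pre_port_mapping_dict_to_str port_mapping) := by
  unfold Pre_port_mapping_dict_to_str; infer_instance
def pvWitness_port_mapping_dict_to_str : (List (Int × Int)) := [(8080, 80), (9000, 9000), (9001, 9001)]

-- On dicts that contain key -1 together with a larger key, A's -1 sentinel mistakes the
-- iteration after key -1 for the first one and silently drops the mapping/range ending at
-- key -1 from the output; B keeps every mapping, which is the intended conversion.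
def D_port_mapping_dict_to_str (port_mapping : List (Int × Int)) : Prop :=
  (∃ p ∈ port_mapping, p.1 = -1) ∧ (∃ p ∈ port_mapping, -1 < p.1)
instance (port_mapping : List (Int × Int)) : Decidable (D_port_mapping_dict_to_str port_mapping) := by
  unfold D_port_mapping_dict_to_str; infer_instance

def Spec_port_mapping_dict_to_str (port_mapping : List (Int × Int)) (out : List String) : Prop :=
  ¬ D_port_mapping_dict_to_str port_mapping → out = port_mapping_dict_to_str_alt port_mapping
instance (port_mapping : List (Int × Int)) (out : List String) : Decidable (Spec_port_mapping_dict_to_str port_mapping out) := by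
  unfold Spec_port_mapping_dict_to_str; infer_instance

def pvDiffWitness_port_mapping_dict_to_str : (List (Int × Int)) := [(-1, 5), (3, 4)]
def pvDiffWitnessOut_port_mapping_dict_to_str : (List String) × (List String) :=
  (["3:4"], ["-1:5", "3:4"])

-- ===== CLAIM (what is proved, stated in full; the proofs are below) =====
def Claim_unchanged_port_mapping_dict_to_str : Prop := ∀ (port_mapping : List (Int × Int)), Dom_port_mapping_dict_to_str port_mapping → Pre_port_mapping_dict_to_str port_mapping → Spec_port_mapping_dict_to_str port_mapping (port_mapping_dict_to_str port_mapping)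
def Claim_changed_port_mapping_dict_to_str : Prop := Dom_port_mapping_dict_to_str (pvDiffWitness_port_mapping_dict_to_str) ∧ Pre_port_mapping_dict_to_str (pvDiffWitness_port_mapping_dict_to_str) ∧ D_port_mapping_dict_to_str (pvDiffWitness_port_mapping_dict_to_str) ∧ port_mapping_dict_to_str (pvDiffWitness_port_mapping_dict_to_str) = pvDiffWitnessOut_port_mapping_dict_to_str.1 ∧ port_mapping_dict_to_str_alt (pvDiffWitness_port_mapping_dict_to_str) = pvDiffWitnessOut_port_mapping_dict_to_str.2 ∧ pvDiffWitnessOut_port_mapping_dict_to_str.1 ≠ pvDiffWitnessOut_port_mapping_dict_to_str.2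

-- ===== LEMMAS AND PROOFS =====

theorem pv_insertBy_congr {α : Type} (f g : α → α → Bool) (x : α) :
    ∀ (acc : List α), (∀ y ∈ acc, f x y = g x y) →
    PySem.List.insertBy f x acc = PySem.List.insertBy g x acc := by
  intro acc
  induction acc with
  | nil => intro _; rfl
  | cons y ys ih =>
      intro h
      simp only [PySem.List.insertBy]
      rw [h y (by simp)]
      by_cases hg : g x y = true
      · simp [hg]
      · simp [hg, ih (fun z hz => h z (by simp [hz]))]

theorem pv_foldl_insertBy_congr {α : Type} (f g : α → α → Bool) :
    ∀ (xs acc : List α),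
      (∀ x ∈ xs, ∀ y ∈ acc, f x y = g x y) →
      (∀ x ∈ xs, ∀ y ∈ xs, f x y = g x y) →
      xs.foldl (fun a x => PySem.List.insertBy f x a) acc
        = xs.foldl (fun a x => PySem.List.insertBy g x a) acc := by
  intro xs
  induction xs with
  | nil => intro acc _ _; rfl
  | cons hd t ih =>
      intro acc hacc hxs
      simp only [List.foldl_cons]
      rw [pv_insertBy_congr f g hd acc (fun y hy => hacc hd (by simp) y hy)]
      apply ih
      · intro u hu v hv
        rcases (PySem.List.mem_insertBy g hd v acc).1 hv with h | h
        · rw [h]; exact hxs u (List.mem_cons_of_mem _ hu) hd (by simp)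
        · exact hacc u (List.mem_cons_of_mem _ hu) v h
      · intro u hu v hv
        exact hxs u (List.mem_cons_of_mem _ hu) v (List.mem_cons_of_mem _ hv)

-- with pairwise-distinct first components, Python's lexicographic tuple sort
-- coincides with sorting by the first component
theorem pv_sorted2_eq_sorted (pm : List (Int × Int))
    (h : ∀ x ∈ pm, ∀ y ∈ pm, x.1 = y.1 → x = y) :
    PySem.List.sorted2 pm Prod.fst Prod.snd = PySem.List.sorted pm Prod.fst := by
  rw [PySem.List.sorted_eq_foldl_insertBy]
  show pm.foldl (fun acc x => PySem.List.insertBy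
        (fun a b => decide (a.1 < b.1) || (!decide (b.1 < a.1) && decide (a.2 < b.2))) x acc) []
      = _
  apply pv_foldl_insertBy_congr
  · intro x _ y hy; simp at hy
  · intro x hx y hy
    by_cases hxy : x.1 = y.1
    · have : x = y := h x hx y hy hxy
      subst this
      simp
    · rcases lt_trichotomy x.1 y.1 with hlt | heq | hgt
      · simp [hlt, not_lt.2 (le_of_lt hlt)]
      · exact absurd heq hxy
      · simp [hgt, not_lt.2 (le_of_lt hgt)]

-- the two rendering functions agree on a nonempty run whose firsts strictly increase
theorem pv_emit_eq (r : List (Int × Int)) (rs ts pf pt : Int)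
    (hh : r.head? = some (rs, ts)) (hl : r.getLast? = some (pf, pt))
    (hc : r.IsChain (fun a b => a.1 < b.1)) :
    pvEmit rs ts pf pt = pvRunStr r := by
  haveI : Trans (fun (a b : Int × Int) => a.1 < b.1) (fun (a b : Int × Int) => a.1 < b.1)
      (fun (a b : Int × Int) => a.1 < b.1) := ⟨fun h1 h2 => lt_trans h1 h2⟩
  cases r with
  | nil => simp at hh
  | cons a t =>
      simp only [List.head?_cons, Option.some.injEq] at hh
      subst hh
      cases t with
      | nil =>
          simp only [List.getLast?_singleton, Option.some.injEq, Prod.mk.injEq] at hl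
          obtain ⟨h1, h2⟩ := hl
          subst h1; subst h2
          simp [pvEmit, pvRunStr]
      | cons b t' =>
          have hmem : (pf, pt) ∈ b :: t' := by
            have := List.mem_of_getLast? (l := b :: t') (a := (pf, pt))
            rw [List.getLast?_cons_cons] at hl
            exact this hl
          have hpw : ((rs, ts) :: b :: t').Pairwise (fun x y => x.1 < y.1) :=
            (List.isChain_iff_pairwise).1 hc
          have hlt : rs < pf := by
            have := (List.pairwise_cons.1 hpw).1 (pf, pt) hmem
            simpa using this
          have hne : rs ≠ pf := ne_of_lt hlt
          have hlast : ((rs, ts) :: b :: t').getLastD (0,0) = (pf, pt) := by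
            simp [List.getLastD_eq_getLast?, hl]
          simp only [pvEmit, pvRunStr, if_neg hne, hlast]
          simp

-- the main simulation invariant: A's running state corresponds to B's closed runs
-- (already rendered into `out`) plus the currently open run `r`
theorem pv_aux : ∀ (l : List (Int × Int)) (out : List String)
    (runs : List (List (Int × Int))) (r : List (Int × Int)) (rs ts pf pt : Int),
    r.head? = some (rs, ts) → r.getLast? = some (pf, pt) →
    r.IsChain (fun a b => a.1 < b.1) →
    out = runs.map pvRunStr →
    (l ≠ [] → pf ≠ -1) → (∀ x ∈ l.dropLast, x.1 ≠ -1) →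
    pvFinish (l.foldl pvStepA (out, rs, ts, pf, pt))
      = (l.foldl pvStepB (runs ++ [r])).map pvRunStr := by
  intro l
  induction l with
  | nil =>
      intro out runs r rs ts pf pt hh hl hc hout _ _
      simp [pvFinish, hout, pv_emit_eq r rs ts pf pt hh hl hc]
  | cons p l' ih =>
      intro out runs r rs ts pf pt hh hl hc hout hm hdl
      have hpf : pf ≠ -1 := hm (by simp)
      simp only [List.foldl_cons]
      have hBlast : (runs ++ [r]).getLast? = some r := by simp
      by_cases hmerge : pf = p.1 - 1 ∧ pt = p.2 - 1
      · -- consecutive: A keeps the range open, B extends the last run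
        have hA : pvStepA (out, rs, ts, pf, pt) p = (out, rs, ts, p.1, p.2) := by
          simp only [pvStepA]
          rw [if_neg hpf, if_pos hmerge]
        have hB : pvStepB (runs ++ [r]) p = runs ++ [r ++ [p]] := by
          simp [pvStepB, hBlast, hl, hmerge.1, hmerge.2]
        rw [hA, hB]
        apply ih
        · cases r with
          | nil => simp at hh
          | cons a t => simpa using hh
        · simp
        · rw [List.isChain_append]
          refine ⟨hc, List.isChain_singleton _, ?_⟩
          intro x hx y hy
          rw [hl] at hx
          have hx' : (pf, pt) = x := by simpa using hx
          have hy' : p = y := by simpa using hy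
          subst hx'; subst hy'
          show pf < p.1
          omega
        · exact hout
        · intro hne
          have : p ∈ (p :: l').dropLast := by
            cases l' with
            | nil => simp at hne
            | cons q t => simp
          exact hdl p this
        · intro x hx
          cases l' with
          | nil => simp at hx
          | cons q t =>
              apply hdl
              simp only [List.dropLast_cons₂]
              exact List.mem_cons_of_mem _ hx
      · -- break: A emits the closed range, B starts a new run
        have hA : pvStepA (out, rs, ts, pf, pt) p
            = (out ++ [pvEmit rs ts pf pt], p.1, p.2, p.1, p.2) := by
          simp only [pvStepA]
          rw [if_neg hpf, if_neg hmerge]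
        have hB : pvStepB (runs ++ [r]) p = (runs ++ [r]) ++ [[p]] := by
          have : ¬ r.getLast? = some (p.1 - 1, p.2 - 1) := by
            rw [hl]
            intro hcontra
            simp only [Option.some.injEq, Prod.mk.injEq] at hcontra
            exact hmerge ⟨hcontra.1, hcontra.2⟩
          simp [pvStepB, hBlast, this]
        rw [hA, hB]
        apply ih
        · simp
        · simp
        · exact List.isChain_singleton _
        · rw [hout]
          simp [pv_emit_eq r rs ts pf pt hh hl hc]
        · intro hne
          have : p ∈ (p :: l').dropLast := by
            cases l' with
            | nil => simp at hne
            | cons q t => simp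
          exact hdl p this
        · intro x hx
          cases l' with
          | nil => simp at hx
          | cons q t =>
              apply hdl
              simp only [List.dropLast_cons₂]
              exact List.mem_cons_of_mem _ hx

-- ===== VERDICT (by name: the statement is the Claim_ definition above) =====
theorem pv_main (pm : List (Int × Int)) (hpre : Pre_port_mapping_dict_to_str pm)
    (hnD : ¬ D_port_mapping_dict_to_str pm) :
    port_mapping_dict_to_str pm = port_mapping_dict_to_str_alt pm := by
  by_cases hemp : pm = []
  · subst hemp; decide
  · unfold port_mapping_dict_to_str port_mapping_dict_to_str_alt
    have hlen : ¬ pm.length = 0 := by simpa [List.length_eq_zero_iff] using hemp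
    rw [if_neg hlen]
    have hinj : ∀ x ∈ pm, ∀ y ∈ pm, x.1 = y.1 → x = y := by
      intro x hx y hy hxy
      exact List.inj_on_of_nodup_map hpre hx hy hxy
    rw [pv_sorted2_eq_sorted pm hinj]
    have hperm : (PySem.List.sorted pm Prod.fst).Perm pm :=
      PySem.List.sorted_perm pm Prod.fst false
    have hsne : PySem.List.sorted pm Prod.fst ≠ [] := by
      intro h
      rw [h] at hperm
      exact hemp hperm.symm.eq_nil
    -- strictly increasing firsts in the sorted list
    have hpw : (PySem.List.sorted pm Prod.fst).Pairwise (fun a b => a.1 ≤ b.1) :=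
      PySem.List.sorted_pairwise pm Prod.fst
    have hnodup : ((PySem.List.sorted pm Prod.fst).map Prod.fst).Nodup :=
      ((hperm.map Prod.fst).nodup_iff).2 hpre
    have hne2 : (PySem.List.sorted pm Prod.fst).Pairwise (fun a b => a.1 ≠ b.1) :=
      List.pairwise_map.1 hnodup
    have hstrict : (PySem.List.sorted pm Prod.fst).Pairwise (fun a b => a.1 < b.1) := by
      have := hpw.and hne2
      exact this.imp (fun h => lt_of_le_of_ne h.1 h.2)
    -- outside D_, no key -1 ever occurs before another item in the sorted order
    have hkey : ∀ x ∈ (PySem.List.sorted pm Prod.fst).dropLast, x.1 ≠ -1 := by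
      intro x hx
      by_cases hno : ∃ p ∈ pm, p.1 = -1
      · have hle : ∀ p ∈ pm, p.1 ≤ -1 := by
          intro p hp
          by_contra hgt
          exact hnD ⟨hno, p, hp, by omega⟩
        have hsplit : (PySem.List.sorted pm Prod.fst).dropLast ++
            [(PySem.List.sorted pm Prod.fst).getLast hsne] = PySem.List.sorted pm Prod.fst :=
          List.dropLast_append_getLast hsne
        have hlastmem : (PySem.List.sorted pm Prod.fst).getLast hsne ∈ pm :=
          hperm.subset (List.getLast_mem hsne)
        have hlast_le : ((PySem.List.sorted pm Prod.fst).getLast hsne).1 ≤ -1 :=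
          hle _ hlastmem
        have := hstrict
        rw [← hsplit] at this
        have hxl : x.1 < ((PySem.List.sorted pm Prod.fst).getLast hsne).1 := by
          have h2 := (List.pairwise_append.1 this).2.2
          exact h2 x hx _ (by simp)
        omega
      · have hxpm : x ∈ pm := hperm.subset (List.dropLast_subset _ hx)
        intro hx1
        exact hno ⟨x, hxpm, hx1⟩
    obtain ⟨q, rest, hqr⟩ := List.exists_cons_of_ne_nil hsne
    rw [hqr]
    simp only [List.foldl_cons]
    have hA : pvStepA ([], -1, -1, -1, -1) q = ([], q.1, q.2, q.1, q.2) := by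
      simp [pvStepA]
    have hB : pvStepB [] q = [] ++ [[q]] := by simp [pvStepB]
    rw [hA, hB]
    apply pv_aux
    · simp
    · simp
    · exact List.isChain_singleton _
    · rfl
    · intro hrne
      apply hkey
      rw [hqr]
      cases rest with
      | nil => exact absurd rfl hrne
      | cons a t => simp
    · intro x hx
      apply hkey
      rw [hqr]
      cases rest with
      | nil => simp at hx
      | cons a t =>
          simp only [List.dropLast_cons₂]
          exact List.mem_cons_of_mem _ hx

theorem port_mapping_dict_to_str_spec : Claim_unchanged_port_mapping_dict_to_str := by
  intro pm _ hpre
  unfold Spec_port_mapping_dict_to_str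
  intro hnD
  exact pv_main pm hpre hnD

theorem port_mapping_dict_to_str_changed : Claim_changed_port_mapping_dict_to_str := by
  unfold Claim_changed_port_mapping_dict_to_str; decide
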